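-- pv_equiv track=rewrite | github.com/sacs-epfl/fairness-audits-with-collaboration | faircoop/audit.py | _distribute_values
-- ===== SOURCE A (Python) =====
-- from typing import List, Tuple
--
-- def _distribute_values(input_list: List, num_agents: int) -> List[List]:
--     # Distribute the values to the agents
--     distributed_values = [[0 for _ in range(len(input_list))] for _ in range(num_agents)]
--     for i, value in enumerate(input_list):
--         equal_share = value // num_agents
--
--         for k in range(num_agents):
--             distributed_values[k][i] += equal_share
--
--         remainder = value % num_agents
--         for k in range(remainder):
--             distributed_values[k][i] += 1
--
--     assert sum([sum(d) for d in distributed_values]) == sum(input_list)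
--
--     return distributed_values
-- ===== SOURCE B (Python) =====
-- def _distribute_values(input_list, num_agents):
--     # Agent k's share of v is the count of multiples-of-stream slots k, k+n, k+2n, ...
--     # below v, i.e. ceil((v - k)/n), computed as one shifted floor division per cell:
--     # no divmod, no remainder comparison, no accumulation.
--     return [[(v - k - 1) // num_agents + 1 for v in input_list]
--             for k in range(num_agents)]
-- ===== Notes on version B (the rewrite author's own statement) =====
-- stated objective: simpler
-- what changed: Each cell is computed directly as ceil((v - k)/num_agents) via one shifted floor division (v - k - 1)//num_agents + 1, eliminating A's zero-matrix initialisation, the equal-share accumulation loop, the divmod/remainder computation and the remainder loop entirely.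
import Mathlib
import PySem

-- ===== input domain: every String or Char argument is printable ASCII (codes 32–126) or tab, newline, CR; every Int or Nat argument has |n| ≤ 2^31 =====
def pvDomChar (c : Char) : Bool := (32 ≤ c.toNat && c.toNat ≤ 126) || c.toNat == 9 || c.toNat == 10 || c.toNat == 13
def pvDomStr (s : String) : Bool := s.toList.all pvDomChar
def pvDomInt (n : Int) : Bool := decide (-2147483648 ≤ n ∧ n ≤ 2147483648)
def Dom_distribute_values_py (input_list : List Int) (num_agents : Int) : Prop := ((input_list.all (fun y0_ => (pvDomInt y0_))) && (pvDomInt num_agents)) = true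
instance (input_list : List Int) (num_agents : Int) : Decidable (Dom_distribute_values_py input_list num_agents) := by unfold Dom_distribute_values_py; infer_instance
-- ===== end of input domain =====

-- B drops A's zero-matrix, accumulation loops and divmod: each cell is the single shifted floor
-- division (v - k - 1)//n + 1 = ceil((v - k)/n) (objective: simpler; equal return values on Pre_).

-- ===== PORT A =====
-- helper: 'distributed_values[k][i] += delta' (k from a range over the agents, i the enumerate index; both nonnegative there)
def pvAddAt (i : Int) (delta : Int) (dv : List (List Int)) (k : Int) : List (List Int) :=
  dv.modify k.toNat (fun row => row.modify i.toNat (· + delta))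

def distribute_values_py (input_list : List Int) (num_agents : Int) : List (List Int) :=
  -- distributed_values = [[0 for _ in range(len(input_list))] for _ in range(num_agents)]
  let init := (PySem.List.pyRange 0 num_agents 1).map (fun _ => input_list.map (fun _ => (0 : Int)))
  -- for i, value in enumerate(input_list): …
  (PySem.List.enumerate input_list 0).foldl (fun dv iv =>
    let equal_share := PySem.Int.floordiv iv.2 num_agents
    let dv1 := (PySem.List.pyRange 0 num_agents 1).foldl (pvAddAt iv.1 equal_share) dv
    let remainder := PySem.Int.mod iv.2 num_agents
    (PySem.List.pyRange 0 remainder 1).foldl (pvAddAt iv.1 1) dv1) init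
  -- the final 'assert' holds on every input of Pre_ (where it fails, Python raises → outside Pre_)

-- ===== PORT B =====
def distribute_values_py_alt (input_list : List Int) (num_agents : Int) : List (List Int) :=
  (PySem.List.pyRange 0 num_agents 1).map (fun k =>
    input_list.map (fun v => PySem.Int.floordiv (v - k - 1) num_agents + 1))

-- ===== PRECONDITION & SPEC =====
-- Pre_ is exactly where the Python A returns: it raises ZeroDivisionError for num_agents = 0 with a
-- non-empty list, and AssertionError for num_agents < 0 with a non-empty list of non-zero sum.
def Pre_distribute_values_py (input_list : List Int) (num_agents : Int) : Prop :=
  0 < num_agents ∨ input_list = [] ∨ (num_agents < 0 ∧ input_list.sum = 0)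
instance (input_list : List Int) (num_agents : Int) : Decidable (Pre_distribute_values_py input_list num_agents) := by unfold Pre_distribute_values_py; infer_instance

def pvWitness_distribute_values_py : List Int × Int := ([5, 3], 2)

def Spec_distribute_values_py (input_list : List Int) (num_agents : Int) (out : List (List Int)) : Prop := out = distribute_values_py_alt input_list num_agents
instance (input_list : List Int) (num_agents : Int) (out : List (List Int)) : Decidable (Spec_distribute_values_py input_list num_agents out) := by unfold Spec_distribute_values_py; infer_instance

-- ===== CLAIM (what is proved, stated in full; the proofs are below) =====
def Claim_equal_distribute_values_py : Prop := ∀ (input_list : List Int) (num_agents : Int), Dom_distribute_values_py input_list num_agents → Pre_distribute_values_py input_list num_agents → Spec_distribute_values_py input_list num_agents (distribute_values_py input_list num_agents)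

-- ===== LEMMAS AND PROOFS =====

-- the cell value A accumulates for agent k and value v
def pvCell (na k v : Int) : Int :=
  PySem.Int.floordiv v na + (if k < PySem.Int.mod v na then 1 else 0)

-- A's cell equals B's single shifted floor division
theorem pvCell_eq (na k v : Int) (hna : 0 < na) (hk : 0 ≤ k) (hkn : k < na) :
    pvCell na k v = PySem.Int.floordiv (v - k - 1) na + 1 := by
  have hvq := PySem.Int.floordiv_mul_add_mod v na
  have hr0 : 0 ≤ PySem.Int.mod v na := PySem.Int.mod_nonneg _ hna
  have hrlt : PySem.Int.mod v na < na := PySem.Int.mod_lt _ hna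
  unfold pvCell
  by_cases h : k < PySem.Int.mod v na
  · rw [if_pos h]
    have heq : PySem.Int.floordiv (v - k - 1) na = PySem.Int.floordiv v na := by
      rw [PySem.Int.floordiv_eq_iff_of_pos hna]
      constructor <;> nlinarith
    omega
  · rw [if_neg h]
    have heq : PySem.Int.floordiv (v - k - 1) na = PySem.Int.floordiv v na - 1 := by
      rw [PySem.Int.floordiv_eq_iff_of_pos hna]
      constructor <;> nlinarith
    omega

-- the matrix after A has processed the first j values
def pvSpec (xs : List Int) (na : Int) (j : Nat) : List (List Int) :=
  (PySem.List.pyRange 0 na 1).map (fun k =>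
    (List.range xs.length).map (fun i => if i < j then pvCell na k (xs.getD i 0) else 0))

theorem pvAddAt_nil (i δ k : Int) : pvAddAt i δ [] k = [] := by simp [pvAddAt]

theorem pvFold_nil (i δ : Int) (l : List Int) : l.foldl (pvAddAt i δ) [] = [] := by
  induction l with
  | nil => rfl
  | cons x l ih => simpa [pvAddAt_nil] using ih

theorem pvRangeCast (b : Int) (_hb : 0 ≤ b) :
    PySem.List.pyRange 0 b 1 = (List.range b.toNat).map (Nat.cast : Nat → Int) := by
  rw [PySem.List.pyRange_one]
  simp

theorem pvFold (i δ : Int) (dv : List (List Int)) (t : Nat) :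
    ((List.range t).map (Nat.cast : Nat → Int)).foldl (pvAddAt i δ) dv
      = dv.mapIdx (fun k row => if k < t then row.modify i.toNat (· + δ) else row) := by
  induction t with
  | zero =>
    apply List.ext_getElem
    · simp
    · intro k h1 h2
      simp [List.getElem_mapIdx]
  | succ t ih =>
    rw [List.range_succ, List.map_append, List.foldl_append, ih]
    simp only [List.map_cons, List.map_nil, List.foldl_cons, List.foldl_nil,
      pvAddAt, Int.toNat_natCast]
    apply List.ext_getElem
    · simp
    · intro k h1 h2
      simp only [List.getElem_modify, List.getElem_mapIdx]
      by_cases hk : t = k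
      · subst hk
        have h4 : t < t + 1 := by omega
        simp [h4]
      · simp only [if_neg hk]
        by_cases hlt : k < t
        · have h4 : k < t + 1 := by omega
          simp [hlt, h4]
        · have h4 : ¬ k < t + 1 := by omega
          simp [hlt, h4]

theorem pvStep (xs : List Int) (na : Int) (hna : 0 < na) (j : Nat) (_hj : j < xs.length) :
    (PySem.List.pyRange 0 (PySem.Int.mod (xs.getD j 0) na) 1).foldl (pvAddAt (j : Int) 1)
      ((PySem.List.pyRange 0 na 1).foldl
        (pvAddAt (j : Int) (PySem.Int.floordiv (xs.getD j 0) na)) (pvSpec xs na j))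
      = pvSpec xs na (j + 1) := by
  have hr0 : 0 ≤ PySem.Int.mod (xs.getD j 0) na := PySem.Int.mod_nonneg _ hna
  have hrna : PySem.Int.mod (xs.getD j 0) na < na := PySem.Int.mod_lt _ hna
  rw [pvRangeCast na (by omega), pvRangeCast _ hr0, pvFold, pvFold]
  apply List.ext_getElem
  · simp [pvSpec]
  · intro k h1 h2
    have hk : k < na.toNat := by
      simpa [pvSpec, PySem.List.length_pyRange_one] using h2
    rw [List.getElem_mapIdx, List.getElem_mapIdx]
    simp only [if_pos hk, Int.toNat_natCast]
    by_cases hkr : k < (PySem.Int.mod (xs.getD j 0) na).toNat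
    · rw [if_pos hkr]
      apply List.ext_getElem
      · simp [pvSpec]
      · intro i hi1 hi2
        simp only [List.getElem_modify, pvSpec, List.getElem_map,
          PySem.List.getElem_pyRange_one, List.getElem_range, zero_add]
        by_cases hij : j = i
        · subst hij
          have h3 : ¬ j < j := by omega
          have h4 : j < j + 1 := by omega
          have h5 : (k : Int) < PySem.Int.mod (xs.getD j 0) na := by omega
          simp only [if_neg h3, if_pos h4, pvCell, if_pos h5]
          simp
        · simp only [if_neg hij]
          by_cases hlt : i < j
          · have h4 : i < j + 1 := by omega
            simp [hlt, h4]
          · have hij2 : i ≠ j := fun h => hij h.symm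
            have h4 : ¬ i < j + 1 := by omega
            simp [hlt, h4]
    · rw [if_neg hkr]
      apply List.ext_getElem
      · simp [pvSpec]
      · intro i hi1 hi2
        simp only [List.getElem_modify, pvSpec, List.getElem_map,
          PySem.List.getElem_pyRange_one, List.getElem_range, zero_add]
        by_cases hij : j = i
        · subst hij
          have h3 : ¬ j < j := by omega
          have h4 : j < j + 1 := by omega
          have h5 : ¬ (k : Int) < PySem.Int.mod (xs.getD j 0) na := by omega
          simp only [if_neg h3, if_pos h4, pvCell, if_neg h5]
          simp
        · simp only [if_neg hij]
          by_cases hlt : i < j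
          · have h4 : i < j + 1 := by omega
            simp [hlt, h4]
          · have hij2 : i ≠ j := fun h => hij h.symm
            have h4 : ¬ i < j + 1 := by omega
            simp [hlt, h4]

theorem pvLoop (xs : List Int) (na : Int) (hna : 0 < na) :
    ∀ (ys : List Int) (j : Nat), ys = xs.drop j →
    (PySem.List.enumerate ys (j : Int)).foldl (fun dv iv =>
      (PySem.List.pyRange 0 (PySem.Int.mod iv.2 na) 1).foldl (pvAddAt iv.1 1)
        ((PySem.List.pyRange 0 na 1).foldl
          (pvAddAt iv.1 (PySem.Int.floordiv iv.2 na)) dv)) (pvSpec xs na j)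
      = pvSpec xs na (j + ys.length) := by
  intro ys
  induction ys with
  | nil =>
    intro j _
    simp [PySem.List.enumerate_nil]
  | cons y ys ih =>
    intro j hdrop
    have hj : j < xs.length := by
      by_contra h
      rw [List.drop_eq_nil_of_le (by omega)] at hdrop
      exact List.cons_ne_nil y ys hdrop
    have hy : xs.getD j 0 = y := by
      have h0 : (xs.drop j)[0]'(by rw [← hdrop]; simp) = y := by
        simp [← hdrop]
      rw [List.getElem_drop] at h0
      simp only [Nat.add_zero] at h0
      rw [List.getD_eq_getElem _ _ hj]
      exact h0
    have htail : ys = xs.drop (j + 1) := by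
      have h2 : (xs.drop j).tail = ys := by rw [← hdrop, List.tail_cons]
      rw [List.tail_drop] at h2
      exact h2.symm
    have hstep := pvStep xs na hna j hj
    rw [hy] at hstep
    rw [PySem.List.enumerate_cons, List.foldl_cons]
    simp only []
    rw [hstep]
    have hcast : ((j : Int) + 1) = ((j + 1 : Nat) : Int) := by push_cast; ring
    rw [hcast, ih (j + 1) htail]
    have hlen : j + 1 + ys.length = j + (y :: ys).length := by
      simp only [List.length_cons]
      omega
    rw [hlen]

theorem pv_main (xs : List Int) (na : Int) :
    distribute_values_py xs na = distribute_values_py_alt xs na := by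
  by_cases hna : 0 < na
  · unfold distribute_values_py distribute_values_py_alt
    simp only []
    have hinit : (PySem.List.pyRange 0 na 1).map (fun _ => xs.map (fun _ => (0 : Int))) = pvSpec xs na 0 := by
      unfold pvSpec
      apply List.map_congr_left
      intro k _
      apply List.ext_getElem
      · simp
      · intro i h1 h2
        simp
    rw [hinit]
    have hloop := pvLoop xs na hna xs 0 (by simp)
    simp only [Nat.cast_zero, Nat.zero_add] at hloop
    rw [hloop]
    apply List.ext_getElem
    · simp [pvSpec]
    · intro a h1 h2
      have ha : a < na.toNat := by
        simpa [PySem.List.length_pyRange_one] using h2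
      simp only [pvSpec, List.getElem_map, PySem.List.getElem_pyRange_one, zero_add]
      apply List.ext_getElem
      · simp
      · intro i hi1 hi2
        have hixs : i < xs.length := by simpa using hi2
        simp only [List.getElem_map, List.getElem_range]
        rw [if_pos hixs, List.getD_eq_getElem _ _ hixs]
        exact pvCell_eq na (a : Int) xs[i] hna (by positivity) (by omega)
  · unfold distribute_values_py distribute_values_py_alt
    simp only []
    rw [PySem.List.pyRange_one_eq_nil (by omega)]
    simp only [List.map_nil]
    apply List.foldl_fixed'
    intro iv
    simp [List.foldl_nil, pvFold_nil]

-- ===== VERDICT (by name: the statement is the Claim_ definition above) =====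
theorem distribute_values_py_spec : Claim_equal_distribute_values_py := by
  intro xs na _ _
  unfold Spec_distribute_values_py
  exact pv_main xs na
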